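-- pv_equiv track=rewrite | github.com/influenzanet/python-ifncli | ifncli/commands/user.py | reorder_profiles
-- ===== SOURCE A (Python) =====
-- from typing import List
--
-- def reorder_profiles(profiles:List):
--     """
--         Make sure the flagged profile as "main" is the first in the profile list
--     """
--     main = []
--     others = []
--     for p in profiles:
--         if 'main' in p and p['main']:
--             main.append(p)
--         else:
--             others.append(p)
--     return main + others
-- ===== SOURCE B (Python) =====
-- def reorder_profiles(profiles):
--     """
--         Make sure the flagged profile as "main" is the first in the profile list
--     """
--     return sorted(profiles, key=lambda p: 0 if ('main' in p and p['main']) else 1)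
-- ===== Notes on version B (the rewrite author's own statement) =====
-- stated objective: idiomatic
-- what changed: Replaced the explicit two-bucket partition loop with a single stable sort on a 0/1 key ('main'-flagged profiles first), relying on sorted's stability to preserve in-group order.
import Mathlib
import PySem

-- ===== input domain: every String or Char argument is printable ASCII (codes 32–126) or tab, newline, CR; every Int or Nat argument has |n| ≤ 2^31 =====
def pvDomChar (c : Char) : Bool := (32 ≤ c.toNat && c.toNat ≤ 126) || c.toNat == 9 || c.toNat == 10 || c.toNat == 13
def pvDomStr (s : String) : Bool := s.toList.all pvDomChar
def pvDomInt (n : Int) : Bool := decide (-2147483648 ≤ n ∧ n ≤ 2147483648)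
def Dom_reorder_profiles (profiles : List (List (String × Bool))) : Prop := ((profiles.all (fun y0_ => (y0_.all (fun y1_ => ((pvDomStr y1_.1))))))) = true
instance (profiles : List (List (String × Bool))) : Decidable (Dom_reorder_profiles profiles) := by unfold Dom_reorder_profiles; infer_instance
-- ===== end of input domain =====

-- B replaces A's two-bucket partition loop with a single stable sort on a 0/1 key (idiomatic; same return value).

-- shared predicate: Python's `'main' in p and p['main']` on a dict with Bool values
def pvMainFlag (p : List (String × Bool)) : Bool := ((PySem.Dict.mk p).get? "main").getD false

-- ===== PORT A =====
def reorder_profiles (profiles : List (List (String × Bool))) : List (List (String × Bool)) :=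
  let r := profiles.foldl
    (fun (acc : List (List (String × Bool)) × List (List (String × Bool))) p =>
      if pvMainFlag p then (acc.1 ++ [p], acc.2) else (acc.1, acc.2 ++ [p]))
    ([], [])
  r.1 ++ r.2

-- ===== PORT B =====
def reorder_profiles_alt (profiles : List (List (String × Bool))) : List (List (String × Bool)) :=
  PySem.List.sorted profiles (fun p => if pvMainFlag p then (0 : Int) else 1)

-- ===== PRECONDITION & SPEC =====
def Spec_reorder_profiles (profiles : List (List (String × Bool))) (out : List (List (String × Bool))) : Prop := out = reorder_profiles_alt profiles
instance (profiles : List (List (String × Bool))) (out : List (List (String × Bool))) : Decidable (Spec_reorder_profiles profiles out) := by unfold Spec_reorder_profiles; infer_instance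

-- ===== CLAIM (what is proved, stated in full; the proofs are below) =====
def Claim_equal_reorder_profiles : Prop := ∀ (profiles : List (List (String × Bool))), Dom_reorder_profiles profiles → Spec_reorder_profiles profiles (reorder_profiles profiles)

-- ===== LEMMAS AND PROOFS =====

-- the 0/1 sort key and its comparison
def pvKey (p : List (String × Bool)) : Int := if pvMainFlag p then 0 else 1

lemma pv_before_char (x y : List (String × Bool)) :
    (decide (pvKey x < pvKey y)) = (pvMainFlag x && !pvMainFlag y) := by
  unfold pvKey
  cases hx : pvMainFlag x <;> cases hy : pvMainFlag y <;> simp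

-- inserting a flagged element into (main ++ others) puts it at the end of the main bucket
lemma pv_insert_main (x : List (String × Bool)) (hx : pvMainFlag x = true) :
    ∀ (m o : List (List (String × Bool))),
      (∀ a ∈ m, pvMainFlag a = true) → (∀ a ∈ o, pvMainFlag a = false) →
      PySem.List.insertBy (fun a b => decide (pvKey a < pvKey b)) x (m ++ o)
        = (m ++ [x]) ++ o := by
  intro m
  induction m with
  | nil =>
      intro o _ ho
      cases o with
      | nil => simp [PySem.List.insertBy]
      | cons y ys =>
          have hy : pvMainFlag y = false := ho y (by simp)
          simp [PySem.List.insertBy, pv_before_char, hx, hy]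
  | cons a m ih =>
      intro o hm ho
      have ha : pvMainFlag a = true := hm a (by simp)
      have : PySem.List.insertBy (fun a b => decide (pvKey a < pvKey b)) x (m ++ o)
          = (m ++ [x]) ++ o := ih o (fun b hb => hm b (by simp [hb])) ho
      simp only [pv_before_char] at this
      simp [PySem.List.insertBy, pv_before_char, hx, ha, this]

-- inserting an unflagged element appends it at the very end
lemma pv_insert_other (x : List (String × Bool)) (hx : pvMainFlag x = false)
    (l : List (List (String × Bool))) :
    PySem.List.insertBy (fun a b => decide (pvKey a < pvKey b)) x l = l ++ [x] := by
  induction l with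
  | nil => simp [PySem.List.insertBy]
  | cons y ys ih =>
      simp only [pv_before_char] at ih
      simp [PySem.List.insertBy, pv_before_char, hx, ih]

-- the insertion-sort fold maintains the partition invariant
lemma pv_fold_sorted (xs : List (List (String × Bool))) :
    ∀ (m o : List (List (String × Bool))),
      (∀ a ∈ m, pvMainFlag a = true) → (∀ a ∈ o, pvMainFlag a = false) →
      xs.foldl (fun acc x => PySem.List.insertBy (fun a b => decide (pvKey a < pvKey b)) x acc) (m ++ o)
        = (m ++ xs.filter pvMainFlag) ++ (o ++ xs.filter (fun x => !pvMainFlag x)) := by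
  induction xs with
  | nil => intro m o _ _; simp
  | cons x xs ih =>
      intro m o hm ho
      cases hx : pvMainFlag x with
      | true =>
          have h1 := pv_insert_main x hx m o hm ho
          have h2 := ih (m ++ [x]) o
            (by intro a ha; rcases List.mem_append.mp ha with h | h
                · exact hm a h
                · simp at h; subst h; exact hx) ho
          simp only [List.foldl_cons, h1, h2]
          simp [hx]
      | false =>
          have h1 := pv_insert_other x hx (m ++ o)
          have h2 := ih m (o ++ [x]) hm
            (by intro a ha; rcases List.mem_append.mp ha with h | h
                · exact ho a h
                · simp at h; subst h; exact hx)
          simp only [List.foldl_cons, h1, List.append_assoc] at *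
          rw [h2]
          simp [hx]

-- A's fold computes the two filters
lemma pv_fold_A (xs : List (List (String × Bool))) :
    ∀ (m o : List (List (String × Bool))),
      xs.foldl
        (fun (acc : List (List (String × Bool)) × List (List (String × Bool))) p =>
          if pvMainFlag p then (acc.1 ++ [p], acc.2) else (acc.1, acc.2 ++ [p]))
        (m, o)
        = (m ++ xs.filter pvMainFlag, o ++ xs.filter (fun x => !pvMainFlag x)) := by
  induction xs with
  | nil => intro m o; simp
  | cons x xs ih =>
      intro m o
      cases hx : pvMainFlag x <;>
        simp [List.foldl_cons, hx, ih, List.append_assoc]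

-- ===== VERDICT (by name: the statement is the Claim_ definition above) =====
theorem reorder_profiles_spec : Claim_equal_reorder_profiles := by
  intro profiles _
  unfold Spec_reorder_profiles reorder_profiles reorder_profiles_alt
  have hB : PySem.List.sorted profiles (fun p => if pvMainFlag p then (0 : Int) else 1)
      = profiles.filter pvMainFlag ++ profiles.filter (fun x => !pvMainFlag x) := by
    have := pv_fold_sorted profiles [] [] (by simp) (by simp)
    simpa [PySem.List.sorted, pvKey] using this
  have hA := pv_fold_A profiles [] []
  simp [hA, hB]
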